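-- pv_equiv track=rewrite | github.com/YoriVerbist/aoc | 2021/python/day3/binary.py | calculate_least_common
-- ===== SOURCE A (Python) =====
-- def calculate_least_common(position: int, lines: list) -> list:
--     if len(lines) == 1:
--         return lines[0]
--     else:
--         sum = 0
--         for i in range(len(lines)):
--             if lines[i][position] == "1":
--                 sum += 1
--         temp = []
--         if sum >= (len(lines) / 2):
--             for line in lines:
--                 if line[position] == "0":
--                     temp.append(line)
--         else:
--             for line in lines:
--                 if line[position] == "1":
--                     temp.append(line)
--         return calculate_least_common(position + 1, temp)
-- ===== SOURCE B (Python) =====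
-- def calculate_least_common(position: int, lines: list) -> list:
--     while len(lines) > 1:
--         ones = sum(1 for line in lines if line[position] == "1")
--         keep = "0" if ones >= len(lines) / 2 else "1"
--         lines = [line for line in lines if line[position] == keep]
--         position += 1
--     return lines[0]
-- ===== Notes on version B (the rewrite author's own statement) =====
-- stated objective: simpler
-- what changed: Replaced the recursion with an iterative while-loop that computes the keep-bit once and does a single filter pass per round, instead of a counting loop plus two mutually exclusive filter branches and a recursive call.
import Mathlib
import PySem

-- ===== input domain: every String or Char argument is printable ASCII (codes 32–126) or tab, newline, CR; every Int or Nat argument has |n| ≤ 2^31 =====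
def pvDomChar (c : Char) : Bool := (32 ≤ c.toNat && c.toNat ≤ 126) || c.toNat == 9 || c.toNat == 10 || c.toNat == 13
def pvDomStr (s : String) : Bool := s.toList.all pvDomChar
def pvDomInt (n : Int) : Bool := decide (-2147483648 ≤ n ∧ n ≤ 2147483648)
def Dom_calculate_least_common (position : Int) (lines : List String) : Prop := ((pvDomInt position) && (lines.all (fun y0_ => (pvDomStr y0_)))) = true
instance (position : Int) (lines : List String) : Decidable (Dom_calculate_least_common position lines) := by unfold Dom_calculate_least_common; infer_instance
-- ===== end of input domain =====

-- B replaces A's recursion by an iterative loop that computes the keep-bit once and filters in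
-- a single pass per round (objective: simpler); equivalence is about the return value only.

-- ===== PORT A =====
-- Fuel makes the recursion total in Lean; inside Pre_ (where Python A returns) each round
-- strictly shrinks the list, so fuel lines.length + 1 is never exhausted there.
-- 'sum >= len(lines)/2' (exact comparison of an int against a half-integer) is ported exactly
-- as 2*sum ≥ len.
def pvLccRec : Nat → Int → List String → String
  | 0, _, _ => ""
  | fuel+1, position, lines =>
    if lines.length = 1 then lines.headD ""
    else
      let sum := lines.foldl
        (fun s line => if PySem.Str.pyGet? line position = some '1' then s + 1 else s) (0 : Int)
      let temp :=
        if 2 * sum ≥ (lines.length : Int) then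
          lines.foldl (fun t line =>
            if PySem.Str.pyGet? line position = some '0' then t ++ [line] else t) []
        else
          lines.foldl (fun t line =>
            if PySem.Str.pyGet? line position = some '1' then t ++ [line] else t) []
      pvLccRec fuel (position + 1) temp

def calculate_least_common (position : Int) (lines : List String) : String :=
  pvLccRec (lines.length + 1) position lines

-- ===== PORT B =====
-- Same fuel guard for totality; never exhausted inside Pre_.
def pvLccLoop : Nat → Int → List String → String
  | 0, _, _ => ""
  | fuel+1, position, lines =>
    if lines.length > 1 then
      let ones := lines.countP (fun line => PySem.Str.pyGet? line position = some '1')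
      let keep : Char := if 2 * (ones : Int) ≥ (lines.length : Int) then '0' else '1'
      pvLccLoop fuel (position + 1)
        (lines.filter (fun line => PySem.Str.pyGet? line position = some keep))
    else lines.headD ""

def calculate_least_common_alt (position : Int) (lines : List String) : String :=
  pvLccLoop (lines.length + 1) position lines

-- ===== PRECONDITION & SPEC =====
-- Helpers for Pre_: the group of lines agreeing with w on positions p..p+j-1, and the
-- bit-criteria keep bit (least common bit, '0' on a tie) of a group at a position.
def pvAgrees (w l : String) (p : Int) (j : Nat) : Bool :=
  (List.range j).all (fun i => PySem.Str.pyGet? l (p + i) == PySem.Str.pyGet? w (p + i))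

def pvGroup (lines : List String) (w : String) (p : Int) (j : Nat) : List String :=
  lines.filter (fun l => pvAgrees w l p j)

def pvKeepBit (p : Int) (ls : List String) : Char :=
  if 2 * ls.countP (fun l => PySem.Str.pyGet? l p = some '1') ≥ ls.length then '0' else '1'

-- Pre_ holds exactly on the inputs where Python A returns a value — it is the textbook
-- specification of the CO2-rating selection: some line w is reached after k rounds, where for
-- each earlier round j the group of lines agreeing with w so far has at least two lines, all
-- indexable at position+j, and w carries that group's least-common bit there, and the k-th
-- group is the singleton {w}.  Outside Pre_ A raises (IndexError on an out-of-range access, or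
-- RecursionError on an empty input or when a round keeps no line) and returns no value, so no
-- input on which A returns is excluded.
def Pre_calculate_least_common (position : Int) (lines : List String) : Prop :=
  ∃ w ∈ lines, ∃ k ∈ List.range (lines.length + 1),
    (pvGroup lines w position k).length = 1 ∧
    ∀ j ∈ List.range k,
      2 ≤ (pvGroup lines w position j).length ∧
      (∀ l ∈ pvGroup lines w position j, (PySem.Str.pyGet? l (position + (j : Int))).isSome) ∧
      PySem.Str.pyGet? w (position + (j : Int))
        = some (pvKeepBit (position + (j : Int)) (pvGroup lines w position j))
instance (position : Int) (lines : List String) : Decidable (Pre_calculate_least_common position lines) := by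
  unfold Pre_calculate_least_common; infer_instance

def pvWitness_calculate_least_common : Int × List String := (0, ["00", "01", "10", "11"])

def Spec_calculate_least_common (position : Int) (lines : List String) (out : String) : Prop := out = calculate_least_common_alt position lines
instance (position : Int) (lines : List String) (out : String) : Decidable (Spec_calculate_least_common position lines out) := by unfold Spec_calculate_least_common; infer_instance

-- ===== CLAIM (what is proved, stated in full; the proofs are below) =====
def Claim_equal_calculate_least_common : Prop := ∀ (position : Int) (lines : List String), Dom_calculate_least_common position lines → Pre_calculate_least_common position lines → Spec_calculate_least_common position lines (calculate_least_common position lines)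

-- ===== LEMMAS AND PROOFS =====

-- A's counting loop and B's countP agree.
theorem pvFoldCount (position : Int) (lines : List String) (c : Int) :
    lines.foldl (fun s line => if PySem.Str.pyGet? line position = some '1' then s + 1 else s) c
      = c + ((lines.countP (fun line => PySem.Str.pyGet? line position = some '1')) : Int) := by
  induction lines generalizing c with
  | nil => simp
  | cons h t ih =>
    by_cases hh : PySem.Str.pyGet? h position = some '1' <;>
      simp only [List.foldl_cons, List.countP_cons, hh, decide_true, decide_false,
        if_true, if_false, ih] <;> push_cast <;> ring

-- A's append loop and B's filter agree.
theorem pvFoldApp (c : Char) (position : Int) (lines acc : List String) :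
    lines.foldl (fun t line => if PySem.Str.pyGet? line position = some c then t ++ [line] else t) acc
      = acc ++ lines.filter (fun line => PySem.Str.pyGet? line position = some c) := by
  induction lines generalizing acc with
  | nil => simp
  | cons h t ih =>
    by_cases hh : PySem.Str.pyGet? h position = some c <;>
      simp only [List.foldl_cons, List.filter_cons, hh, decide_true, decide_false,
        if_true, if_false, ih, List.append_assoc, List.singleton_append]
    all_goals simp

-- A's recursion on an emptied list just burns fuel and yields "".
theorem pvLccRec_nil (fuel : Nat) (p : Int) : pvLccRec fuel p [] = "" := by
  induction fuel generalizing p with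
  | zero => rfl
  | succ n ih => simp [pvLccRec, ih]

-- The two fuel-bounded programs agree on every input and every fuel.
theorem pvLccRec_eq_loop (fuel : Nat) (p : Int) (ls : List String) :
    pvLccRec fuel p ls = pvLccLoop fuel p ls := by
  induction fuel generalizing p ls with
  | zero => rfl
  | succ n ih =>
    match ls with
    | [] => simp [pvLccRec, pvLccLoop, pvLccRec_nil]
    | [a] => simp [pvLccRec, pvLccLoop]
    | a :: b :: t =>
      have hlen : (a :: b :: t).length ≠ 1 := by simp
      have hgt : (a :: b :: t).length > 1 := by simp only [List.length_cons]; omega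
      rw [pvLccRec, pvLccLoop]
      simp only [hlen, if_false, hgt, if_true, pvFoldCount, pvFoldApp, List.nil_append, zero_add]
      by_cases hc : 2 * (((a :: b :: t).countP
          (fun line => PySem.Str.pyGet? line p = some '1') : Int)) ≥ ((a :: b :: t).length : Int)
      · rw [if_pos hc, if_pos hc, ih]
      · rw [if_neg hc, if_neg hc, ih]

-- ===== VERDICT (by name: the statement is the Claim_ definition above) =====
theorem calculate_least_common_spec : Claim_equal_calculate_least_common := by
  intro position lines _ _
  unfold Spec_calculate_least_common calculate_least_common calculate_least_common_alt
  exact pvLccRec_eq_loop (lines.length + 1) position lines
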